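-- pv_equiv track=rewrite | github.com/AleksandarLukic96/02155_RISC_V_Instruction_Set_Simulator | src/utils.py | sign_extend
-- ===== SOURCE A (Python) =====
-- def sign_extend(num, msb_pos = 16):  # Always 32 bits values
--     if (msb_pos <= 0) | (msb_pos > 32):
--         return 0
--
--     # Placeholder for result
--     sign_extension_mask = 0x0
--     res = 0x0
--
--     # Find sign mask according to number of bits
--     sign_mask = 0b1 << msb_pos - 1
--
--     # Extract signed bit accroding to number of bits
--     signed_bit = (num & sign_mask) >> (msb_pos - 1)
--
--     # Extend according to signed bit
--     if signed_bit == 1: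
--         sign_extension = 0x1
--     else:
--         sign_extension = 0x0
--
--     for i in range(32 - msb_pos):
--         sign_extension_mask = sign_extension_mask | (sign_extension << i)
--
--     sign_extension_mask = sign_extension_mask << msb_pos
--
--     res = sign_extension_mask | num
--     return res
-- ===== SOURCE B (Python) =====
-- def sign_extend(num, msb_pos = 16):  # Always 32 bits values
--     if 0 < msb_pos <= 32:
--         bit = (num >> (msb_pos - 1)) & 1
--         return (bit * ((1 << 32) - (1 << msb_pos))) | num
--     return 0
-- ===== Notes on version B (the rewrite author's own statement) =====
-- stated objective: simpler
-- what changed: The bit-by-bit loop ORing the sign bit into each upper position and the if/else selecting the extension bit are replaced by one branch-free arithmetic expression bit * ((1<<32) - (1<<msb_pos)), with the sign bit read by shift-then-mask instead of mask-then-shift.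
import Mathlib
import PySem

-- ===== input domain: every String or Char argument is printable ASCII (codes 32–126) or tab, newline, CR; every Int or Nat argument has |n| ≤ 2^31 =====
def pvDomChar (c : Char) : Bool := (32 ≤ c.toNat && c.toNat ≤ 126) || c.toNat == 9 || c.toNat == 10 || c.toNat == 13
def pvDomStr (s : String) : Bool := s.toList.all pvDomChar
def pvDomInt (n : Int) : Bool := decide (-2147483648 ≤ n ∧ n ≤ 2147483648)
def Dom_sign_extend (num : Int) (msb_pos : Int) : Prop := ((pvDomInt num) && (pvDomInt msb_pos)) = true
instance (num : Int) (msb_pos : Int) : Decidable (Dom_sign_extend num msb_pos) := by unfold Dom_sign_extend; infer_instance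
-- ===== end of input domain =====

-- B replaces A's bit-by-bit mask-accumulation loop and its two-step branch by one branch-free
-- arithmetic expression: the sign bit is read with a shift-then-mask (instead of mask-then-shift)
-- and multiplied into the closed-form extension mask (1<<32) - (1<<msb_pos) (simpler; not measured faster).
-- ===== PORT A =====
-- literal transliteration of A; List.range is exact for range(32-msb_pos) since 32-msb_pos ≥ 0 here
def sign_extend (num : Int) (msb_pos : Int) : Int :=
  if msb_pos ≤ 0 ∨ 32 < msb_pos then 0
  else
    let sign_mask : Int := (1:Int) <<< (msb_pos - 1).toNat
    let signed_bit : Int := (PySem.Int.band num sign_mask) >>> (msb_pos - 1).toNat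
    let sign_extension : Int := if signed_bit = 1 then 1 else 0
    let sign_extension_mask : Int :=
      (List.range (32 - msb_pos).toNat).foldl
        (fun (m : Int) (i : Nat) => PySem.Int.bor m (sign_extension <<< i)) 0
    let sign_extension_mask := sign_extension_mask <<< msb_pos.toNat
    PySem.Int.bor sign_extension_mask num

-- ===== PORT B =====
def sign_extend_alt (num : Int) (msb_pos : Int) : Int :=
  if 0 < msb_pos ∧ msb_pos ≤ 32 then
    let bit : Int := PySem.Int.band (num >>> (msb_pos - 1).toNat) 1
    PySem.Int.bor (bit * (((1:Int) <<< 32) - ((1:Int) <<< msb_pos.toNat))) num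
  else 0

-- ===== PRECONDITION & SPEC =====
def Spec_sign_extend (num : Int) (msb_pos : Int) (out : Int) : Prop := out = sign_extend_alt num msb_pos
instance (num : Int) (msb_pos : Int) (out : Int) : Decidable (Spec_sign_extend num msb_pos out) := by unfold Spec_sign_extend; infer_instance

-- ===== CLAIM =====
def Claim_equal_sign_extend : Prop := ∀ (num : Int) (msb_pos : Int), Dom_sign_extend num msb_pos → Spec_sign_extend num msb_pos (sign_extend num msb_pos)

-- ===== LEMMAS AND PROOFS =====

-- (n & 2^k) >> k = (n >> k) & 1, on Nat
theorem pv_nat_bit (n k : Nat) : (n &&& 2^k) >>> k = (n >>> k) &&& 1 := by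
  rw [Nat.and_two_pow, Nat.and_one_is_mod, Nat.shiftRight_eq_div_pow, Nat.shiftRight_eq_div_pow,
      Nat.mul_div_cancel _ (Nat.two_pow_pos k)]
  rcases Nat.mod_two_eq_zero_or_one (n / 2^k) with h | h <;>
    simp [Nat.testBit, Nat.shiftRight_eq_div_pow, h]

-- the negative-operand (two's-complement) counterpart of pv_nat_bit
theorem pv_nat_bit_neg (m k : Nat) : (2^k - (2^k &&& m)) >>> k = 1 - (1 &&& (m >>> k)) := by
  rw [Nat.and_comm, Nat.and_two_pow, Nat.and_comm, Nat.and_one_is_mod,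
      Nat.shiftRight_eq_div_pow, Nat.shiftRight_eq_div_pow]
  rcases Nat.mod_two_eq_zero_or_one (m / 2^k) with h | h <;>
    simp [Nat.testBit, Nat.shiftRight_eq_div_pow, h, Nat.div_self (Nat.two_pow_pos k)]

theorem pv_neg_ediv (m : Nat) (d : Int) (hd : 0 < d) : (-(m:Int) - 1) / d = -((m:Int)/d) - 1 := by
  have h1 := Int.mul_ediv_add_emod (m:Int) d
  have h2 := Int.emod_nonneg (m:Int) (by omega : d ≠ 0)
  have h3 := Int.emod_lt_of_pos (m:Int) hd
  have h : (-(m:Int) - 1) / d = -((m:Int)/d) - 1 ∧ (-(m:Int) - 1) % d = d - 1 - (m:Int) % d := by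
    rw [Int.ediv_emod_unique'' (by omega : d ≠ 0)]
    refine ⟨by ring_nf; nlinarith, by omega, by rw [abs_of_pos hd]; omega⟩
  exact h.1

theorem pv_cast_shiftRight (m : Nat) (k : Nat) : ((m:Int)) >>> k = ((m >>> k : Nat) : Int) := by
  exact_mod_cast rfl

theorem pv_one_shiftLeft (k : Nat) : (1:Int) <<< k = ((2^k : Nat) : Int) := by
  rw [Int.shiftLeft_eq, one_mul]
  exact_mod_cast rfl

-- A's mask-then-shift sign-bit extraction equals B's shift-then-mask one, for every Int
theorem pv_bit_extract (n : Int) (k : Nat) :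
    (PySem.Int.band n ((1:Int) <<< k)) >>> k = PySem.Int.band (n >>> k) 1 := by
  by_cases hn : 0 ≤ n
  · have h1 : PySem.Int.band n ((1:Int) <<< k) = ((n.toNat &&& 2^k : Nat) : Int) := by
      rw [pv_one_shiftLeft, PySem.Int.band_of_nonneg hn (Int.natCast_nonneg _), Int.toNat_natCast]
    have h2 : n >>> k = ((n.toNat >>> k : Nat) : Int) := by
      conv_lhs => rw [← Int.toNat_of_nonneg hn]
      exact pv_cast_shiftRight _ _
    rw [h1, pv_cast_shiftRight, pv_nat_bit, h2,
        PySem.Int.band_of_nonneg (Int.natCast_nonneg _) (by norm_num), Int.toNat_natCast, Int.toNat_one]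
  · have hm0 : (0:Int) ≤ -n - 1 := by omega
    set m : Nat := (-n-1).toNat with hmdef
    have h1 : PySem.Int.band n ((1:Int) <<< k) = ((2^k - (2^k &&& m) : Nat) : Int) := by
      rw [pv_one_shiftLeft]
      simp only [PySem.Int.band]
      rw [if_neg hn, if_pos (Int.natCast_nonneg _), Int.toNat_natCast]
    have hm : n = -(m:Int) - 1 := by omega
    have hc : ((m / 2^k : Nat) : Int) = (m:Int) / (((2^k : Nat)) : Int) := by
      exact_mod_cast rfl
    have hdiv : n >>> k = n / (((2^k : Nat)) : Int) := by
      first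
      | (rw [Int.shiftRight_eq_div_pow]; norm_cast)
      | rw [Int.shiftRight_eq_div_pow]
    have hsr : n >>> k = -((m >>> k : Nat) : Int) - 1 := by
      rw [hdiv, hm, pv_neg_ediv m (((2^k : Nat)) : Int) (by exact_mod_cast Nat.two_pow_pos k),
          Nat.shiftRight_eq_div_pow, hc]
    have hneg : ¬ 0 ≤ n >>> k := by
      rw [hsr]
      have := Int.natCast_nonneg (m >>> k)
      omega
    have h2 : PySem.Int.band (n >>> k) 1 = ((1 - (1 &&& (m >>> k)) : Nat) : Int) := by
      have hx : -(n >>> k) - 1 = ((m >>> k : Nat) : Int) := by rw [hsr]; ring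
      simp only [PySem.Int.band]
      rw [if_neg hneg, if_pos (by norm_num : (0:Int) ≤ 1), hx, Int.toNat_natCast, Int.toNat_one]
    rw [h1, pv_cast_shiftRight, pv_nat_bit_neg, h2]

-- B's sign bit is 0 or 1
theorem pv_band_one_01 (x : Int) : PySem.Int.band x 1 = 0 ∨ PySem.Int.band x 1 = 1 := by
  by_cases hx : 0 ≤ x
  · simp only [PySem.Int.band]
    rw [if_pos hx, if_pos (by norm_num : (0:Int) ≤ 1), Int.toNat_one]
    have := Nat.and_one_is_mod x.toNat
    omega
  · simp only [PySem.Int.band]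
    rw [if_neg hx, if_pos (by norm_num : (0:Int) ≤ 1), Int.toNat_one]
    have := Nat.and_one_is_mod (-x - 1).toNat
    omega

-- A's accumulation loop with a zero sign bit leaves the mask at zero
theorem pv_foldl_zero (l : List Nat) :
    l.foldl (fun (m : Int) (i : Nat) => PySem.Int.bor m ((0:Int) <<< i)) 0 = 0 := by
  induction l with
  | nil => rfl
  | cons a t ih =>
    rw [List.foldl_cons, Int.zero_shiftLeft, PySem.Int.bor_zero]
    exact ih

-- ===== VERDICT =====
set_option maxRecDepth 8192 in
theorem sign_extend_spec : Claim_equal_sign_extend := by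
  intro num msb_pos _
  unfold Spec_sign_extend sign_extend sign_extend_alt
  by_cases hg : msb_pos ≤ 0 ∨ 32 < msb_pos
  · have hg' : ¬ (0 < msb_pos ∧ msb_pos ≤ 32) := by omega
    rw [if_pos hg, if_neg hg']
  · have h1 : 0 < msb_pos := by omega
    have h2 : msb_pos ≤ 32 := by omega
    have hb := pv_bit_extract num (msb_pos - 1).toNat
    simp only [if_neg hg, if_pos (And.intro h1 h2)]
    by_cases hs : (PySem.Int.band num ((1:Int) <<< (msb_pos - 1).toNat)) >>> (msb_pos - 1).toNat = 1
    · have hb1 : PySem.Int.band (num >>> (msb_pos - 1).toNat) 1 = 1 := hb.symm.trans hs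
      simp only [hs, if_true, eq_self_iff_true, hb1, one_mul]
      congr 1
      interval_cases msb_pos <;> decide
    · have hb0 : PySem.Int.band (num >>> (msb_pos - 1).toNat) 1 = 0 := by
        rcases pv_band_one_01 (num >>> (msb_pos - 1).toNat) with h | h
        · exact h
        · exact absurd (hb.trans h) hs
      simp only [if_neg hs, hb0, zero_mul]
      rw [pv_foldl_zero, Int.zero_shiftLeft]
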